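-- pv_equiv track=rewrite | github.com/lsngmin/gravifox-ai | core/models/multipatch.py | _suggest_grid
-- ===== SOURCE A (Python) =====
-- from typing import Callable, Dict, Iterable, List, Optional, Sequence, Tuple, Union
--
-- def _suggest_grid(n_patches: int) -> Tuple[int, int]:
--     """요청된 패치 수에 맞는 격자 크기를 추정한다."""
--
--     if n_patches <= 0:
--         return 1, 1
--
--     best_rows = 1
--     best_cols = n_patches
--     best_difference = best_cols - best_rows
--
--     for rows in range(1, n_patches + 1):
--         cols = -(-n_patches // rows)  # ceil division
--         cells = rows * cols
--         if cells < n_patches: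
--             continue
--         difference = abs(rows - cols)
--         current_area = rows * cols
--         best_area = best_rows * best_cols
--         if current_area < best_area or (current_area == best_area and difference < best_difference):
--             best_rows, best_cols = rows, cols
--             best_difference = difference
--         if rows > n_patches:
--             break
--     return best_rows, best_cols
-- ===== SOURCE B (Python) =====
-- def _suggest_grid(n_patches: int):
--     """O(sqrt n): the best grid is (d, n/d) with d the largest divisor <= isqrt(n)."""
--     if n_patches <= 0:
--         return 1, 1
--     r = 1
--     while (r + 1) * (r + 1) <= n_patches:
--         r += 1
--     while n_patches % r:
--         r -= 1
--     return r, n_patches // r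
-- ===== Notes on version B (the rewrite author's own statement) =====
-- stated objective: faster
-- what changed: A scans every rows value 1..n keeping the best (area, aspect-difference) grid; B uses that the minimal area is always exactly n (rows=1 works), so the answer is the divisor pair (d, n/d) with d the largest divisor of n not exceeding isqrt(n), found by an O(sqrt n) integer-sqrt climb and a descending divisor scan.
import Mathlib
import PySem

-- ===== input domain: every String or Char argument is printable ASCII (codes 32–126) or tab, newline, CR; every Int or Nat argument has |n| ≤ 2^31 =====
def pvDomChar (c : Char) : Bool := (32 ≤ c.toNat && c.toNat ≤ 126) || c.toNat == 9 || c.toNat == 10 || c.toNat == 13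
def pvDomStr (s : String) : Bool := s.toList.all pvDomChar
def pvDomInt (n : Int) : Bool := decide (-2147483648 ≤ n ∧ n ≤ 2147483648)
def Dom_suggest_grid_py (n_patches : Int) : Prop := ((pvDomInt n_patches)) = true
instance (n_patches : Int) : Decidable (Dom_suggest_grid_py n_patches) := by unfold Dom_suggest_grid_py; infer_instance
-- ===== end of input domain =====

-- B replaces A's O(n) scan over all row counts by an O(sqrt n) search for the largest
-- divisor of n not exceeding isqrt(n) (objective: faster, asymptotically).

-- ===== PORT A =====
def pvStepA (n : Int) (st : Bool × Int × Int × Int) (rows : Int) : Bool × Int × Int × Int :=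
  if st.1 then st
  else
    let cols := -(PySem.Int.floordiv (-n) rows)
    let cells := rows * cols
    if cells < n then st
    else
      let difference := |rows - cols|
      let current_area := rows * cols
      let best_area := st.2.1 * st.2.2.1
      let best :=
        if current_area < best_area ∨ (current_area = best_area ∧ difference < st.2.2.2)
        then (rows, cols, difference) else st.2
      if rows > n then (true, best) else (false, best)

def suggest_grid_py (n_patches : Int) : List Int :=
  if n_patches ≤ 0 then [1, 1]
  else
    let fin := (PySem.List.pyRange 1 (n_patches + 1) 1).foldl (pvStepA n_patches)
      (false, 1, n_patches, n_patches - 1)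
    [fin.2.1, fin.2.2.1]

-- ===== PORT B =====
-- `r = 1; while (r+1)*(r+1) <= n: r += 1`  (the `0 ≤ r` conjunct only makes the recursion total)
def pvIsqrtUp (n r : Int) : Int :=
  if h : 0 ≤ r ∧ (r + 1) * (r + 1) ≤ n then pvIsqrtUp n (r + 1) else r
termination_by (n - r).toNat
decreasing_by
  obtain ⟨h0, h1⟩ := h
  have : r + 1 ≤ (r + 1) * (r + 1) := by nlinarith
  omega

-- `while n % r: r -= 1`  (the `1 < r` conjunct only makes the recursion total: n % 1 == 0 anyway)
def pvDivDown (n r : Int) : Int :=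
  if h : 1 < r ∧ PySem.Int.mod n r ≠ 0 then pvDivDown n (r - 1) else r
termination_by r.toNat
decreasing_by omega

def suggest_grid_py_alt (n_patches : Int) : List Int :=
  if n_patches ≤ 0 then [1, 1]
  else
    let r := pvDivDown n_patches (pvIsqrtUp n_patches 1)
    [r, PySem.Int.floordiv n_patches r]

-- ===== PRECONDITION & SPEC =====
def Spec_suggest_grid_py (n_patches : Int) (out : List Int) : Prop := out = suggest_grid_py_alt n_patches
instance (n_patches : Int) (out : List Int) : Decidable (Spec_suggest_grid_py n_patches out) := by unfold Spec_suggest_grid_py; infer_instance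

-- ===== CLAIM (what is proved, stated in full; the proofs are below) =====
def Claim_equal_suggest_grid_py : Prop := ∀ (n_patches : Int), Dom_suggest_grid_py n_patches → Spec_suggest_grid_py n_patches (suggest_grid_py n_patches)

-- ===== LEMMAS AND PROOFS =====

-- pvMdiv n k = the largest divisor r of n with 1 ≤ r ≤ k and r*r ≤ n (1 if k = 0)
def pvMdiv (n : Int) : Nat → Int
  | 0 => 1
  | k + 1 => if ((k : Int) + 1) ∣ n ∧ ((k : Int) + 1) * ((k : Int) + 1) ≤ n
             then (k : Int) + 1 else pvMdiv n k

lemma pvMdiv_props (n : Int) (hn : 1 ≤ n) (k : Nat) :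
    1 ≤ pvMdiv n k ∧ pvMdiv n k ∣ n ∧ pvMdiv n k * pvMdiv n k ≤ n ∧ pvMdiv n k ≤ max 1 (k : Int) := by
  induction k with
  | zero => simpa [pvMdiv] using hn
  | succ k ih =>
    simp only [pvMdiv]
    split_ifs with h
    · exact ⟨by omega, h.1, h.2, by push_cast; omega⟩
    · refine ⟨ih.1, ih.2.1, ih.2.2.1, ?_⟩
      have := ih.2.2.2
      push_cast
      push_cast at this
      omega

lemma pvMdiv_max (n : Int) (k : Nat) (r : Int)
    (h1 : 1 ≤ r) (hk : r ≤ (k : Int)) (hd : r ∣ n) (hs : r * r ≤ n) : r ≤ pvMdiv n k := by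
  induction k with
  | zero => omega
  | succ k ih =>
    simp only [pvMdiv]
    split_ifs with h
    · push_cast at hk ⊢; omega
    · by_cases hr : r = (k : Int) + 1
      · exact absurd ⟨hr ▸ hd, hr ▸ hs⟩ h
      · push_cast at hk
        exact ih (by omega)

set_option maxHeartbeats 1000000 in
lemma pvStepA_lemma (n : Int) (hn : 1 ≤ n) (k : Nat) (hk : (k : Int) + 1 ≤ n) :
    pvStepA n (false, pvMdiv n k, n / pvMdiv n k, n / pvMdiv n k - pvMdiv n k) ((k : Int) + 1)
      = (false, pvMdiv n (k + 1), n / pvMdiv n (k + 1), n / pvMdiv n (k + 1) - pvMdiv n (k + 1)) := by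
  set r : Int := (k : Int) + 1 with hr_def
  have hr : (0 : Int) < r := by positivity
  obtain ⟨hm1, hmd, hms, hmle⟩ := pvMdiv_props n hn k
  set m := pvMdiv n k with hm_def
  set P := n / m with hP_def
  have hbest : m * P = n := Int.mul_ediv_cancel' hmd
  have hc : (-(PySem.Int.floordiv (-n) r) - 1) * r < n ∧ n ≤ -(PySem.Int.floordiv (-n) r) * r :=
    (PySem.Int.neg_floordiv_neg_eq_iff_of_pos hr).mp rfl
  have hP1 : 1 ≤ P := by nlinarith [hc.1, hc.2]
  by_cases hdvd : r ∣ n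
  · obtain ⟨q, hq⟩ := hdvd
    have hq1 : 1 ≤ q := by nlinarith
    have hcq : -PySem.Int.floordiv (-n) r = q := by
      have h1 : -PySem.Int.floordiv (-n) r - 1 < q := by nlinarith [hc.1]
      have h2 : q ≤ -PySem.Int.floordiv (-n) r := by nlinarith [hc.2]
      omega
    have hnr : n / r = q := by rw [hq]; exact Int.mul_ediv_cancel_left q (by omega)
    have hMk : pvMdiv n (k + 1) = if r ∣ n ∧ r * r ≤ n then r else m := by
      simp [pvMdiv, hm_def, hr_def]
    by_cases hsq : r * r ≤ n
    · -- divisor with r*r ≤ n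
      have hrq : r ≤ q := by nlinarith
      have hM : pvMdiv n (k + 1) = r := by rw [hMk, if_pos ⟨⟨q, hq⟩, hsq⟩]
      have hdiff : |r - q| = q - r := by rw [abs_of_nonpos (by linarith : r - q ≤ 0)]; ring
      rcases Nat.eq_zero_or_pos k with rfl | hk0
      · -- r = 1 = m: state already the candidate for rows = 1
        have hm1' : m = 1 := by simp [hm_def, pvMdiv]
        have hr1 : r = 1 := by simp [hr_def]
        have hq' : q = n := by rw [hr1] at hq; linarith
        have hPn : P = n := by rw [hm1'] at hbest; linarith
        simp only [pvStepA, hM, hnr, hcq, hdiff]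
        rw [if_neg (by simp), if_neg (by linarith [hq]), if_neg (by linarith [hk]),
            if_neg (by push_neg; exact ⟨by linarith [hq, hbest], fun _ => by linarith⟩)]
        simp only [Prod.mk.injEq]
        exact ⟨trivial, by linarith, by linarith, by linarith⟩
      · have hmk : m ≤ (k : Int) := by
          have : max 1 (k : Int) = (k : Int) := by omega
          omega
        have hmr : m < r := by omega
        have hqP : q < P := by nlinarith
        simp only [pvStepA, hM, hnr, hcq, hdiff]
        rw [if_neg (by simp), if_neg (by nlinarith [hq]), if_neg (by omega),
            if_pos (Or.inr ⟨by nlinarith [hq], by omega⟩)]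
    · -- divisor with r*r > n: its cofactor q ≤ sqrt was already taken
      have hqr : q < r := by nlinarith
      have hqq : q * q ≤ n := by nlinarith
      have hqk : q ≤ (k : Int) := by omega
      have hqm : q ≤ m := pvMdiv_max n k q hq1 hqk ⟨r, by rw [hq]; ring⟩ hqq
      have hPr : P ≤ r := by nlinarith
      have hM : pvMdiv n (k + 1) = m := by rw [hMk, if_neg (fun h => hsq h.2)]
      have hdiff : |r - q| = r - q := abs_of_nonneg (by omega)
      simp only [pvStepA, hM, hcq, hdiff]
      rw [if_neg (by simp), if_neg (by nlinarith [hq]), if_neg (by omega),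
          if_neg (by push_neg; exact ⟨by nlinarith [hq], fun _ => by omega⟩)]
  · -- not a divisor: area strictly exceeds n, never better
    have hgt : n < -PySem.Int.floordiv (-n) r * r := by
      rcases lt_or_eq_of_le hc.2 with h | h
      · exact h
      · exact absurd ⟨-PySem.Int.floordiv (-n) r, by linarith⟩ hdvd
    have hM : pvMdiv n (k + 1) = m := by
      simp only [pvMdiv, hm_def, hr_def]
      rw [if_neg (fun h => hdvd h.1)]
    simp only [pvStepA, hM]
    rw [if_neg (by simp), if_neg (by nlinarith), if_neg (by omega),
        if_neg (by push_neg; exact ⟨by nlinarith, fun h => absurd h (by nlinarith)⟩)]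

-- after folding rows = 1..k, A's state is the grid (d, n/d) for d the largest divisor ≤ k with d*d ≤ n
lemma pvLoopA (n : Int) (hn : 1 ≤ n) (k : Nat) (hk : (k : Int) ≤ n) :
    (PySem.List.pyRange 1 ((k : Int) + 1) 1).foldl (pvStepA n) (false, 1, n, n - 1)
      = (false, pvMdiv n k, n / pvMdiv n k, n / pvMdiv n k - pvMdiv n k) := by
  induction k with
  | zero =>
    rw [show ((0 : Nat) : Int) + 1 = 1 by norm_num, PySem.List.pyRange_one_eq_nil (le_refl 1)]
    simp [pvMdiv]
  | succ k ih =>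
    have hcast : ((k + 1 : Nat) : Int) + 1 = ((k : Int) + 1) + 1 := by push_cast; ring
    rw [hcast, PySem.List.pyRange_one_succ_right (by omega), List.foldl_append]
    rw [ih (by push_cast at hk; omega)]
    simp only [List.foldl]
    exact pvStepA_lemma n hn k (by push_cast at hk; omega)

lemma pvIsqrtUp_spec (n r : Int) (h1 : 1 ≤ r) (h2 : r * r ≤ n) :
    1 ≤ pvIsqrtUp n r ∧ pvIsqrtUp n r * pvIsqrtUp n r ≤ n ∧ n < (pvIsqrtUp n r + 1) * (pvIsqrtUp n r + 1) := by
  fun_induction pvIsqrtUp n r with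
  | case1 r h ih => exact ih (by omega) h.2
  | case2 r h =>
    refine ⟨h1, h2, ?_⟩
    rcases not_and_or.mp h with h' | h' <;> omega

lemma pvDivDown_spec (n r : Int) (hr : 1 ≤ r) :
    1 ≤ pvDivDown n r ∧ pvDivDown n r ∣ n ∧ pvDivDown n r ≤ r ∧
      ∀ t : Int, 1 ≤ t → t ≤ r → t ∣ n → t ≤ pvDivDown n r := by
  fun_induction pvDivDown n r with
  | case1 r h ih =>
    obtain ⟨h1, h2⟩ := h
    obtain ⟨a, b, c, d⟩ := ih (by omega)
    refine ⟨a, b, by omega, fun t ht1 ht2 htd => ?_⟩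
    rcases eq_or_lt_of_le ht2 with rfl | ht3
    · exact absurd ((PySem.Int.mod_eq_zero_iff_dvd n t).mpr htd) h2
    · exact d t ht1 (by omega) htd
  | case2 r h =>
    rcases not_and_or.mp h with h' | h'
    · have hr1 : r = 1 := by omega
      subst hr1
      exact ⟨le_refl _, one_dvd n, le_refl _, fun t ht1 ht2 _ => ht2⟩
    · have hd : r ∣ n := (PySem.Int.mod_eq_zero_iff_dvd n r).mp (by simpa using h')
      exact ⟨hr, hd, le_refl _, fun t _ ht2 _ => ht2⟩

-- ===== VERDICT (by name: the statement is the Claim_ definition above) =====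
theorem suggest_grid_py_spec : Claim_equal_suggest_grid_py := by
  intro n _
  unfold Spec_suggest_grid_py
  by_cases h : n ≤ 0
  · simp [suggest_grid_py, suggest_grid_py_alt, h]
  · have hn : 1 ≤ n := by omega
    have hcast : ((n.toNat : Nat) : Int) = n := Int.toNat_of_nonneg (by omega)
    -- A computes [pvMdiv n n.toNat, n / pvMdiv n n.toNat]
    have hA : suggest_grid_py n = [pvMdiv n n.toNat, n / pvMdiv n n.toNat] := by
      have hloop := pvLoopA n hn n.toNat (by omega)
      rw [hcast] at hloop
      simp only [suggest_grid_py, if_neg h, hloop]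
    -- B computes the same divisor
    obtain ⟨hs1, hs2, hs3⟩ := pvIsqrtUp_spec n 1 (le_refl 1) (by nlinarith)
    set s := pvIsqrtUp n 1 with hs_def
    obtain ⟨hd1, hdd, hds, hdmax⟩ := pvDivDown_spec n s hs1
    set d := pvDivDown n s with hd_def
    obtain ⟨hm1, hmd, hms, _⟩ := pvMdiv_props n hn n.toNat
    have hdn : d ≤ n := Int.le_of_dvd (by omega) hdd
    have hle1 : d ≤ pvMdiv n n.toNat :=
      pvMdiv_max n n.toNat d hd1 (by omega) hdd (by nlinarith)
    have hmles : pvMdiv n n.toNat ≤ s := by nlinarith [hms]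
    have hle2 : pvMdiv n n.toNat ≤ d := hdmax _ hm1 hmles hmd
    have hde : d = pvMdiv n n.toNat := le_antisymm hle1 hle2
    have hB : suggest_grid_py_alt n = [d, n / d] := by
      simp only [suggest_grid_py_alt, if_neg h, ← hs_def, ← hd_def,
        PySem.Int.floordiv_eq_ediv_of_pos (by omega : (0:Int) < d)]
    rw [hA, hB, hde]
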